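-- pv_equiv track=rewrite | github.com/pranavthaivalappil/ai-prep-mentor | prepinsta50/strings/05_ascii_values.py | find_ascii_range
-- ===== SOURCE A (Python) =====
-- def find_ascii_range(s):
--     """
--     Find minimum and maximum ASCII values in string
--
--     Args:
--         s (str): Input string
--
--     Returns:
--         tuple: (min_ascii, max_ascii, min_char, max_char)
--     """
--     if not s:
--         return None, None, None, None
--
--     ascii_values = [ord(char) for char in s]
--     min_ascii = min(ascii_values)
--     max_ascii = max(ascii_values)
--     min_char = chr(min_ascii)
--     max_char = chr(max_ascii)
--
--     return min_ascii, max_ascii, min_char, max_char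
-- ===== SOURCE B (Python) =====
-- def find_ascii_range(s):
--     if not s:
--         return None, None, None, None
--     mn = mx = ord(s[0])
--     for ch in s[1:]:
--         o = ord(ch)
--         if o < mn:
--             mn = o
--         elif o > mx:
--             mx = o
--     return mn, mx, chr(mn), chr(mx)
-- ===== Notes on version B (the rewrite author's own statement) =====
-- stated objective: alternative
-- what changed: Instead of materialising the list of ord values and scanning it twice with min() and max(), B tracks both extremes in a single fused pass over the characters.
import Mathlib
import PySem

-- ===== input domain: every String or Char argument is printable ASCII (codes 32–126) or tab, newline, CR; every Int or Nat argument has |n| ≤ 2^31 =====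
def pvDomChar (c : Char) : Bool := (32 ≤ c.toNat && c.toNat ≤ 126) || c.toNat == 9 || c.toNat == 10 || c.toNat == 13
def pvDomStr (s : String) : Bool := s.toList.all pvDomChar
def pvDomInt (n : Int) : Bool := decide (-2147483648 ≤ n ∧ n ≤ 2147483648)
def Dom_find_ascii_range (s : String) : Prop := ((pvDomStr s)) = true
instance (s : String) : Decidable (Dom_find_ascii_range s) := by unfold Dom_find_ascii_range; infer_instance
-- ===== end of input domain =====

-- B replaces A's intermediate ord-list and its two separate min()/max() scans with one
-- fused pass that maintains both extremes; same results, different decomposition.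

-- ===== PORT A =====
-- A: guard on empty, build the list of ord values, take min and max of it, chr both.
def find_ascii_range (s : String) : Option Int × Option Int × Option String × Option String :=
  if s.toList.isEmpty then (none, none, none, none)
  else
    let asciiValues : List Int := s.toList.map (fun c => (c.toNat : Int))
    match PySem.List.min? asciiValues (fun x => x), PySem.List.max? asciiValues (fun x => x) with
    | some mn, some mx =>
        (some mn, some mx, some (String.ofList [Char.ofNat mn.toNat]), some (String.ofList [Char.ofNat mx.toNat]))
    | _, _ => (none, none, none, none)  -- unreachable: the list is nonempty here

-- ===== PORT B =====
-- B: single fused pass, min/max initialised from the first character.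
def find_ascii_range_alt (s : String) : Option Int × Option Int × Option String × Option String :=
  match s.toList with
  | [] => (none, none, none, none)
  | c :: rest =>
    let p := rest.foldl
      (fun (p : Int × Int) d =>
        let o : Int := (d.toNat : Int)
        if o < p.1 then (o, p.2) else if p.2 < o then (p.1, o) else p)
      ((c.toNat : Int), (c.toNat : Int))
    (some p.1, some p.2, some (String.ofList [Char.ofNat p.1.toNat]), some (String.ofList [Char.ofNat p.2.toNat]))

-- ===== PRECONDITION & SPEC =====
def Spec_find_ascii_range (s : String) (out : Option Int × Option Int × Option String × Option String) : Prop := out = find_ascii_range_alt s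
instance (s : String) (out : Option Int × Option Int × Option String × Option String) : Decidable (Spec_find_ascii_range s out) := by unfold Spec_find_ascii_range; infer_instance

-- ===== CLAIM (what is proved, stated in full; the proofs are below) =====
def Claim_equal_find_ascii_range : Prop := ∀ (s : String), Dom_find_ascii_range s → Spec_find_ascii_range s (find_ascii_range s)

-- ===== LEMMAS AND PROOFS =====

-- B's fused pair-fold computes exactly (running min, running max), provided min ≤ max.
lemma pairFold_eq (l : List Char) (a b : Int) (h : a ≤ b) :
    l.foldl
      (fun (p : Int × Int) d =>
        let o : Int := (d.toNat : Int)
        if o < p.1 then (o, p.2) else if p.2 < o then (p.1, o) else p)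
      (a, b)
    = (l.foldl (fun m d => min m (d.toNat : Int)) a,
       l.foldl (fun m d => max m (d.toNat : Int)) b) := by
  induction l generalizing a b with
  | nil => rfl
  | cons x t ih =>
    simp only [List.foldl]
    by_cases h1 : (x.toNat : Int) < a
    · rw [if_pos h1, min_eq_right h1.le, max_eq_left (h1.le.trans h)]
      exact ih _ _ (h1.le.trans h)
    · rw [if_neg h1, min_eq_left (le_of_not_gt h1)]
      by_cases h2 : b < (x.toNat : Int)
      · rw [if_pos h2, max_eq_right h2.le]
        exact ih _ _ (h.trans h2.le)
      · rw [if_neg h2, max_eq_left (le_of_not_gt h2)]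
        exact ih _ _ h

theorem find_ascii_range_spec : Claim_equal_find_ascii_range := by
  intro s _
  unfold Spec_find_ascii_range find_ascii_range find_ascii_range_alt
  cases hs : s.toList with
  | nil => simp
  | cons c rest =>
    simp only [List.isEmpty_cons, List.map_cons]
    rw [if_neg (by simp)]
    rw [PySem.List.min?_id_cons, PySem.List.max?_id_cons]
    rw [List.foldl_map, List.foldl_map]
    rw [pairFold_eq rest ((c.toNat : Int)) ((c.toNat : Int)) le_rfl]
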